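-- pv_equiv track=rewrite | github.com/isomjd-code/courthand | cp40_place_latinizer.py | generate_uv_variants
-- ===== SOURCE A (Python) =====
-- from typing import List, Dict, Optional, Set, Tuple
-- from itertools import product
--
-- def generate_uv_variants(text: str) -> Set[str]:
--     """
--     Generate U/V interchange variants.
--
--     In classical and medieval Latin:
--     - V was used for both U and V sounds
--     - Initial U was often written as V
--     - Medial V might be written as U
--
--     Args:
--         text: Latin text
--
--     Returns:
--         Set of all U/V variants including the original
--     """
--     if not text:
--         return {text} if text else set()
--
--     variants = set()
--
--     # Find all positions with U or V
--     positions = []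
--     for i, char in enumerate(text):
--         if char in 'UuVv':
--             positions.append(i)
--
--     if not positions:
--         return {text}
--
--     # Generate all combinations of U/V at each position
--     for combo in product(['U', 'V'], repeat=len(positions)):
--         variant = list(text)
--         for pos_idx, char in zip(positions, combo):
--             # Preserve original case
--             if text[pos_idx].isupper():
--                 variant[pos_idx] = char.upper()
--             else:
--                 variant[pos_idx] = char.lower()
--         variants.add(''.join(variant))
--
--     return variants
-- ===== SOURCE B (Python) =====
-- def generate_uv_variants(text):
--     acc = ['']
--     for ch in text:
--         if ch == 'U' or ch == 'V':
--             acc = [p + c for p in acc for c in 'UV']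
--         elif ch == 'u' or ch == 'v':
--             acc = [p + c for p in acc for c in 'uv']
--         else:
--             acc = [p + ch for p in acc]
--     return set(acc)
-- ===== Notes on version B (the rewrite author's own statement) =====
-- stated objective: simpler
-- what changed: Replaces the position-scan plus itertools.product over index combinations (rebuilding and re-indexing a char list per combination) with a single left-to-right fold that extends an accumulator of prefix strings character by character.
-- intended difference: On the empty string A returns set() while B returns {''}; the docstring promises the set of variants including the original, so {''} is the intended value there. — e.g. on generate_uv_variants(""): A returns [], B returns [""]
import Mathlib
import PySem

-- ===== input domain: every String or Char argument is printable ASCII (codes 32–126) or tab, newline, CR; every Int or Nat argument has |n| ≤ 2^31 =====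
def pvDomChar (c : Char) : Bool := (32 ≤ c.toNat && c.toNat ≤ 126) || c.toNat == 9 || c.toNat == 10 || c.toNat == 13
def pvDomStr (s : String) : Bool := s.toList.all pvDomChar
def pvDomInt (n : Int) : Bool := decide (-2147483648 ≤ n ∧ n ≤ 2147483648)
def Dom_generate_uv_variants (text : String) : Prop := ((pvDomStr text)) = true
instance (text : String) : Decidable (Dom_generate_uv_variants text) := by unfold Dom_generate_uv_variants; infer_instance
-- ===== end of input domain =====

-- B replaces A's position-scan + itertools.product over index combinations with a single
-- left-to-right fold extending an accumulator of prefixes (objective: simpler); on the empty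
-- string A returns the empty set while B returns {""} (stated as D_ below).

-- ===== PORT A =====
-- char in 'UuVv'
def pvUv (c : Char) : Bool := ("UuVv".toList).contains c

-- itertools.product(['U', 'V'], repeat=n), in product's order (first coordinate slowest)
def pvCombos : Nat → List (List Char)
  | 0 => [[]]
  | n + 1 => (['U', 'V'] : List Char).flatMap (fun c => (pvCombos n).map (fun t => c :: t))

-- the inner loop 'for pos_idx, char in zip(positions, combo): variant[pos_idx] = …'
-- (orig = list(text) for the text[pos_idx].isupper() lookup, v = variant)
def pvApplyF (orig v : List Char) (pcs : List (Int × Char)) : List Char :=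
  pcs.foldl (fun v pc =>
    if (PySem.List.pyGetD orig pc.1 ' ').isUpper
      then PySem.List.pySetD v pc.1 pc.2.toUpper
      else PySem.List.pySetD v pc.1 pc.2.toLower) v

def generate_uv_variants (text : String) : List String :=
  if text.toList = [] then
    (if text.toList ≠ [] then PySem.Set.ofList [text] else PySem.Set.empty)
  else
    let positions : List Int :=
      (PySem.List.enumerate text.toList 0).foldl
        (fun ps ic => if pvUv ic.2 then ps ++ [ic.1] else ps) []
    if positions = [] then PySem.Set.ofList [text]
    else
      (pvCombos positions.length).foldl
        (fun vs combo =>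
          PySem.Set.add vs
            (String.ofList (pvApplyF text.toList text.toList (positions.zip combo))))
        PySem.Set.empty

-- ===== PORT B =====
-- one loop step of Source B: extend every accumulated prefix by the current character
-- (strings are carried as List Char; the final set applies String.ofList)
def pvStepB (acc : List (List Char)) (ch : Char) : List (List Char) :=
  if ch == 'U' || ch == 'V' then
    acc.flatMap (fun p => (['U', 'V'] : List Char).map (fun c => p ++ [c]))
  else if ch == 'u' || ch == 'v' then
    acc.flatMap (fun p => (['u', 'v'] : List Char).map (fun c => p ++ [c]))
  else
    acc.map (fun p => p ++ [ch])

def generate_uv_variants_alt (text : String) : List String :=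
  PySem.Set.ofList ((text.toList.foldl pvStepB [[]]).map String.ofList)

-- ===== PRECONDITION & SPEC =====
-- On the empty string A returns set() while B returns {''}; the docstring promises the set of
-- all variants including the original, so {''} is the intended value there.
def D_generate_uv_variants (text : String) : Prop := text = ""
instance (text : String) : Decidable (D_generate_uv_variants text) := by
  unfold D_generate_uv_variants; infer_instance
def Spec_generate_uv_variants (text : String) (out : List String) : Prop :=
  ¬ D_generate_uv_variants text → out = generate_uv_variants_alt text
instance (text : String) (out : List String) : Decidable (Spec_generate_uv_variants text out) := by
  unfold Spec_generate_uv_variants; infer_instance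
def pvDiffWitness_generate_uv_variants : String := ""
def pvDiffWitnessOut_generate_uv_variants : (List String) × (List String) := ([], [""])

-- ===== CLAIM (what is proved, stated in full; the proofs are below) =====
def Claim_unchanged_generate_uv_variants : Prop := ∀ (text : String), Dom_generate_uv_variants text → Spec_generate_uv_variants text (generate_uv_variants text)
def Claim_changed_generate_uv_variants : Prop := Dom_generate_uv_variants (pvDiffWitness_generate_uv_variants) ∧ D_generate_uv_variants (pvDiffWitness_generate_uv_variants) ∧ generate_uv_variants (pvDiffWitness_generate_uv_variants) = pvDiffWitnessOut_generate_uv_variants.1 ∧ generate_uv_variants_alt (pvDiffWitness_generate_uv_variants) = pvDiffWitnessOut_generate_uv_variants.2 ∧ pvDiffWitnessOut_generate_uv_variants.1 ≠ pvDiffWitnessOut_generate_uv_variants.2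
def Claim_exact_generate_uv_variants : Prop := ∀ (text : String), Dom_generate_uv_variants text → D_generate_uv_variants text → generate_uv_variants text ≠ generate_uv_variants_alt text

-- ===== LEMMAS AND PROOFS =====

-- recursive characterisation of A's positions loop
def pvPosR (i : Int) : List Char → List Int
  | [] => []
  | c :: t => if pvUv c then i :: pvPosR (i + 1) t else pvPosR (i + 1) t

theorem pvPos_foldl (cs : List Char) : ∀ (i : Int) (acc : List Int),
    (PySem.List.enumerate cs i).foldl
      (fun ps ic => if pvUv ic.2 then ps ++ [ic.1] else ps) acc
    = acc ++ pvPosR i cs := by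
  induction cs with
  | nil => intro i acc; simp [PySem.List.enumerate_nil, pvPosR]
  | cons c t ih =>
    intro i acc
    rw [PySem.List.enumerate_cons]
    simp only [List.foldl_cons, pvPosR]
    by_cases h : pvUv c = true
    · simp [h, ih]
    · simp [h, ih]

theorem pvPosR_shift (cs : List Char) : ∀ i : Int,
    pvPosR (i + 1) cs = (pvPosR i cs).map (· + 1) := by
  induction cs with
  | nil => intro i; simp [pvPosR]
  | cons c t ih =>
    intro i
    by_cases h : pvUv c = true
    · simp [pvPosR, h, ih]
    · simp [pvPosR, h, ih]

theorem pvPosR_nonneg (cs : List Char) : ∀ (i p : Int), p ∈ pvPosR i cs → i ≤ p := by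
  induction cs with
  | nil => intro i p hp; simp [pvPosR] at hp
  | cons c t ih =>
    intro i p hp
    by_cases h : pvUv c = true
    · simp [pvPosR, h] at hp
      rcases hp with rfl | hp
      · exact le_refl _
      · exact le_of_lt (lt_of_lt_of_le (by omega) (ih (i + 1) p hp))
    · simp [pvPosR, h] at hp
      exact le_of_lt (lt_of_lt_of_le (by omega) (ih (i + 1) p hp))

-- shifting all positions by one skips the head of both lists
theorem pvApplyF_shift (pcs : List (Int × Char)) : ∀ (c a : Char) (orig v : List Char),
    (∀ p ∈ pcs, 0 ≤ p.1) →
    pvApplyF (c :: orig) (a :: v) (pcs.map (fun p => (p.1 + 1, p.2))) = a :: pvApplyF orig v pcs := by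
  induction pcs with
  | nil => intro c a orig v _; simp [pvApplyF]
  | cons pc rest ih =>
    intro c a orig v hnn
    have h0 : 0 ≤ pc.1 := hnn pc (by simp)
    obtain ⟨n, hn⟩ : ∃ n : Nat, pc.1 = (n : Int) := ⟨pc.1.toNat, (Int.toNat_of_nonneg h0).symm⟩
    have hrest : ∀ p ∈ rest, 0 ≤ p.1 := fun p hp => hnn p (by simp [hp])
    simp only [List.map_cons, pvApplyF, List.foldl_cons]
    have hget : PySem.List.pyGetD (c :: orig) (pc.1 + 1) ' ' = PySem.List.pyGetD orig pc.1 ' ' := by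
      rw [hn, show ((n : Int) + 1) = ((n + 1 : Nat) : Int) from by push_cast; ring]
      rw [PySem.List.pyGetD_natCast, PySem.List.pyGetD_natCast, List.getD_cons_succ]
    have hsetU : PySem.List.pySetD (a :: v) (pc.1 + 1) pc.2.toUpper
        = a :: PySem.List.pySetD v pc.1 pc.2.toUpper := by
      rw [hn, show ((n : Int) + 1) = ((n + 1 : Nat) : Int) from by push_cast; ring]
      rw [PySem.List.pySetD_natCast, PySem.List.pySetD_natCast, List.set_cons_succ]
    have hsetL : PySem.List.pySetD (a :: v) (pc.1 + 1) pc.2.toLower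
        = a :: PySem.List.pySetD v pc.1 pc.2.toLower := by
      rw [hn, show ((n : Int) + 1) = ((n + 1 : Nat) : Int) from by push_cast; ring]
      rw [PySem.List.pySetD_natCast, PySem.List.pySetD_natCast, List.set_cons_succ]
    rw [hget]
    by_cases hu : (PySem.List.pyGetD orig pc.1 ' ').isUpper = true
    · simp only [if_pos hu]
      rw [hsetU]
      exact ih c a orig (PySem.List.pySetD v pc.1 pc.2.toUpper) hrest
    · simp only [if_neg hu]
      rw [hsetL]
      exact ih c a orig (PySem.List.pySetD v pc.1 pc.2.toLower) hrest

-- every step of B acts on each accumulated prefix independently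
theorem pvStepB_split (acc : List (List Char)) (c : Char) :
    pvStepB acc c = acc.flatMap (fun p => (pvStepB [[]] c).map (fun w => p ++ w)) := by
  unfold pvStepB
  by_cases h1 : (c == 'U' || c == 'V') = true
  · simp [h1]
  · by_cases h2 : (c == 'u' || c == 'v') = true
    · simp [h1, h2]
    · simp [h1, h2, ← List.map_eq_flatMap]

-- B's fold from any accumulator = accumulator ⋈ B's fold from the empty prefix
theorem pvFoldB_acc (cs : List Char) : ∀ (acc : List (List Char)),
    cs.foldl pvStepB acc
    = acc.flatMap (fun p => (cs.foldl pvStepB [[]]).map (fun w => p ++ w)) := by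
  induction cs with
  | nil => intro acc; simp
  | cons c t ih =>
    intro acc
    simp only [List.foldl_cons]
    rw [ih (pvStepB acc c), ih (pvStepB [[]] c)]
    rw [pvStepB_split acc c]
    simp [List.flatMap_map, List.map_flatMap, List.flatMap_assoc, List.append_assoc,
      Function.comp_def]

-- the heart of the file: A's map over product combinations equals B's fold
theorem pvMain (cs : List Char) :
    (pvCombos (pvPosR 0 cs).length).map
      (fun combo => pvApplyF cs cs ((pvPosR 0 cs).zip combo))
    = cs.foldl pvStepB [[]] := by
  induction cs with
  | nil => simp [pvPosR, pvCombos, pvApplyF]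
  | cons c t ih =>
    have hsh : pvPosR 1 t = (pvPosR 0 t).map (· + 1) := by simpa using pvPosR_shift t 0
    have hnn : ∀ (combo : List Char) (p : Int × Char), p ∈ (pvPosR 0 t).zip combo → 0 ≤ p.1 := by
      intro combo p hp
      exact pvPosR_nonneg t 0 p.1 (List.of_mem_zip hp).1
    have hzipmap : ∀ combo : List Char, ((pvPosR 0 t).map (· + 1)).zip combo
        = ((pvPosR 0 t).zip combo).map (fun p => (p.1 + 1, p.2)) := by
      intro combo; rw [List.zip_map_left]; rfl
    by_cases h : pvUv c = true
    · -- head is one of U u V v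
      have hc : c = 'U' ∨ c = 'u' ∨ c = 'V' ∨ c = 'v' := by
        simp [pvUv] at h
        rcases h with h | h | h | h <;> simp [h]
      have key : ∀ (x : Char) (combo : List Char),
          pvApplyF (c :: t) (c :: t) (((0 : Int) :: (pvPosR 0 t).map (· + 1)).zip (x :: combo))
          = (if c.isUpper then x.toUpper else x.toLower) :: pvApplyF t t ((pvPosR 0 t).zip combo) := by
        intro x combo
        simp only [List.zip_cons_cons, pvApplyF, List.foldl_cons]
        rw [hzipmap combo]
        rw [show PySem.List.pyGetD (c :: t) (0 : Int) ' ' = c from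
          PySem.List.pyGetD_zero_cons _ _ _]
        by_cases hu : c.isUpper = true
        · simp only [if_pos hu]
          rw [show PySem.List.pySetD (c :: t) (0 : Int) x.toUpper = x.toUpper :: t from by
            rw [PySem.List.pySetD_of_nonneg _ _ (by norm_num)]; rfl]
          exact pvApplyF_shift _ c x.toUpper t t (hnn combo)
        · simp only [if_neg hu]
          rw [show PySem.List.pySetD (c :: t) (0 : Int) x.toLower = x.toLower :: t from by
            rw [PySem.List.pySetD_of_nonneg _ _ (by norm_num)]; rfl]
          exact pvApplyF_shift _ c x.toLower t t (hnn combo)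
      rw [List.foldl_cons, pvFoldB_acc t (pvStepB [[]] c)]
      rw [show pvPosR 0 (c :: t) = (0 : Int) :: (pvPosR 0 t).map (· + 1) from by
        simp [pvPosR, h, hsh]]
      simp only [List.length_cons, List.length_map, pvCombos]
      rcases hc with rfl | rfl | rfl | rfl
      · have k1 : ∀ combo, pvApplyF ('U' :: t) ('U' :: t)
            (((0 : Int) :: (pvPosR 0 t).map (· + 1)).zip ('U' :: combo))
            = 'U' :: pvApplyF t t ((pvPosR 0 t).zip combo) := fun combo => by rw [key]; rfl
        have k2 : ∀ combo, pvApplyF ('U' :: t) ('U' :: t)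
            (((0 : Int) :: (pvPosR 0 t).map (· + 1)).zip ('V' :: combo))
            = 'V' :: pvApplyF t t ((pvPosR 0 t).zip combo) := fun combo => by rw [key]; rfl
        rw [show pvStepB [[]] 'U' = [['U'], ['V']] from by decide, ← ih]
        simp only [List.zip_cons_cons] at k1 k2
        simp [List.map_map, Function.comp_def, k1, k2]
      · have k1 : ∀ combo, pvApplyF ('u' :: t) ('u' :: t)
            (((0 : Int) :: (pvPosR 0 t).map (· + 1)).zip ('U' :: combo))
            = 'u' :: pvApplyF t t ((pvPosR 0 t).zip combo) := fun combo => by rw [key]; rfl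
        have k2 : ∀ combo, pvApplyF ('u' :: t) ('u' :: t)
            (((0 : Int) :: (pvPosR 0 t).map (· + 1)).zip ('V' :: combo))
            = 'v' :: pvApplyF t t ((pvPosR 0 t).zip combo) := fun combo => by rw [key]; rfl
        rw [show pvStepB [[]] 'u' = [['u'], ['v']] from by decide, ← ih]
        simp only [List.zip_cons_cons] at k1 k2
        simp [List.map_map, Function.comp_def, k1, k2]
      · have k1 : ∀ combo, pvApplyF ('V' :: t) ('V' :: t)
            (((0 : Int) :: (pvPosR 0 t).map (· + 1)).zip ('U' :: combo))
            = 'U' :: pvApplyF t t ((pvPosR 0 t).zip combo) := fun combo => by rw [key]; rfl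
        have k2 : ∀ combo, pvApplyF ('V' :: t) ('V' :: t)
            (((0 : Int) :: (pvPosR 0 t).map (· + 1)).zip ('V' :: combo))
            = 'V' :: pvApplyF t t ((pvPosR 0 t).zip combo) := fun combo => by rw [key]; rfl
        rw [show pvStepB [[]] 'V' = [['U'], ['V']] from by decide, ← ih]
        simp only [List.zip_cons_cons] at k1 k2
        simp [List.map_map, Function.comp_def, k1, k2]
      · have k1 : ∀ combo, pvApplyF ('v' :: t) ('v' :: t)
            (((0 : Int) :: (pvPosR 0 t).map (· + 1)).zip ('U' :: combo))
            = 'u' :: pvApplyF t t ((pvPosR 0 t).zip combo) := fun combo => by rw [key]; rfl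
        have k2 : ∀ combo, pvApplyF ('v' :: t) ('v' :: t)
            (((0 : Int) :: (pvPosR 0 t).map (· + 1)).zip ('V' :: combo))
            = 'v' :: pvApplyF t t ((pvPosR 0 t).zip combo) := fun combo => by rw [key]; rfl
        rw [show pvStepB [[]] 'v' = [['u'], ['v']] from by decide, ← ih]
        simp only [List.zip_cons_cons] at k1 k2
        simp [List.map_map, Function.comp_def, k1, k2]
    · -- ordinary character: prepended to every variant on both sides
      have hc1 : ¬(c == 'U' || c == 'V') = true := by
        intro hcc
        apply h
        simp at hcc
        rcases hcc with rfl | rfl <;> decide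
      have hc2 : ¬(c == 'u' || c == 'v') = true := by
        intro hcc
        apply h
        simp at hcc
        rcases hcc with rfl | rfl <;> decide
      rw [List.foldl_cons, pvFoldB_acc t (pvStepB [[]] c)]
      rw [show pvStepB [[]] c = [[c]] from by simp [pvStepB, hc1, hc2]]
      rw [show pvPosR 0 (c :: t) = (pvPosR 0 t).map (· + 1) from by simp [pvPosR, h, hsh]]
      simp only [List.length_map]
      have key : ∀ combo : List Char,
          pvApplyF (c :: t) (c :: t) (((pvPosR 0 t).map (· + 1)).zip combo)
          = c :: pvApplyF t t ((pvPosR 0 t).zip combo) := by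
        intro combo
        rw [hzipmap combo]
        exact pvApplyF_shift _ c c t t (hnn combo)
      simp only [key]
      rw [← ih]
      simp [List.map_map, Function.comp_def]

-- ===== VERDICT (by name: the statement is the Claim_ definition above) =====
theorem generate_uv_variants_spec : Claim_unchanged_generate_uv_variants := by
  intro text _ hnd
  have hne : text.toList ≠ [] := by
    simpa [String.toList_eq_nil_iff] using hnd
  show generate_uv_variants text = generate_uv_variants_alt text
  unfold generate_uv_variants generate_uv_variants_alt
  rw [if_neg hne]
  simp only [pvPos_foldl, List.nil_append]
  by_cases hp : pvPosR 0 text.toList = []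
  · rw [if_pos hp, ← pvMain, hp]
    simp [pvCombos, pvApplyF, String.ofList_toList]
  · rw [if_neg hp]
    rw [show ∀ f : List Char → String,
        (pvCombos (pvPosR 0 text.toList).length).foldl
          (fun vs combo => PySem.Set.add vs (f combo)) PySem.Set.empty
        = PySem.Set.ofList ((pvCombos (pvPosR 0 text.toList).length).map f) from by
      intro f
      rw [← PySem.Set.update_map_eq_foldl_add]
      exact PySem.Set.update_nil_left _]
    rw [← pvMain]
    simp [List.map_map, Function.comp_def]

theorem generate_uv_variants_changed : Claim_changed_generate_uv_variants := by
  unfold Claim_changed_generate_uv_variants; decide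

theorem generate_uv_variants_tight : Claim_exact_generate_uv_variants := by
  intro text _ hd
  rw [show text = "" from hd]
  decide
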